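-- pv_equiv track=rewrite | github.com/pypi-data/pypi-mirror-309 | packages/lingpatlab/lingpatlab-0.2.13.tar.gz/lingpatlab-0.2.13/lingpatlab/tokenizer/svc/tokenize_use_graffl.py | _handle_punkt
-- ===== SOURCE A (Python) =====
-- from typing import Optional, List
--
-- def _handle_punkt(
--                   tokens: list) -> list:
--
--     def transform(token: str) -> list:
--
--         if token.isalpha():
--             return [token]
--
--         master = []
--         buffer = []
--
--         token_len = len(token)
--
--         for i in range(token_len):
--
--             def get_p1() -> Optional[str]:
--                 if i - 1 >= 0:
--                     return token[i - 1]
--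
--             def get_p2() -> Optional[str]:
--                 if i - 2 >= 0:
--                     return token[i - 2]
--
--             def get_n1() -> Optional[str]:
--                 if i + 1 < token_len:
--                     return token[i + 1]
--
--             def get_n2() -> Optional[str]:
--                 if i + 2 < token_len:
--                     return token[i + 2]
--
--             p2 = get_p2()
--             p1 = get_p1()
--             ch = token[i]
--             n1 = get_n1()
--             n2 = get_n2()
--
--             # fast-sentence-tokenize#1; keep underscored entities together
--             if ch.isalpha() or ch.isnumeric() or ch in [' ', '_']:
--                 buffer.append(ch)
--             elif ch in ['.', ','] and p1 and p1.isnumeric():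
--                 buffer.append(ch)  # e.g., 1.06 or 325,000
--             elif ch == "'" and p1 and p1.isalpha():
--                 buffer.append(ch)  # e.g., Women's
--             elif ch == '&' and p1 and p1.isalpha() and n1 and n1.isalpha():
--                 buffer.append(ch)  # e.g., A&W
--             else:
--                 if len(buffer):
--                     master.append(''.join(buffer))
--                 if len(ch):
--                     master.append(ch)
--                 buffer = []
--
--             i += 1
--
--         if len(buffer):
--             master.append(''.join(buffer))
--
--         return master
--
--     normalized = []
--     for token in tokens:
--         [normalized.append(x) for x in transform(token)]
--
--     return normalized
-- ===== SOURCE B (Python) =====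
-- def _keep(p, c, n):
--     # keep rule for char c with previous char p and next char n (None when absent)
--     return (c.isalpha() or c.isnumeric() or c in ' _'
--             or (c in '.,' and p is not None and p.isnumeric())
--             or (c == "'" and p is not None and p.isalpha())
--             or (c == '&' and p is not None and p.isalpha()
--                 and n is not None and n.isalpha()))
--
--
-- def _split(cs):
--     """Return (seg, None) when cs has no separator, else (seg, (sep, rest)):
--     seg is the maximal kept prefix, sep its first separator char, rest the tail
--     after it.  Left context restarts at None for each call: safe, because a
--     separator is never alphanumeric, so no prev-based keep rule can fire
--     across it."""
--     prev = None
--     for j, c in enumerate(cs):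
--         nxt = cs[j + 1] if j + 1 < len(cs) else None
--         if not _keep(prev, c, nxt):
--             return cs[:j], (c, cs[j + 1:])
--         prev = c
--     return cs, None
--
--
-- def _transform(token):
--     if token.isalpha():
--         return [token]
--     out = []
--     cs = list(token)
--     while True:
--         seg, brk = _split(cs)
--         if seg:
--             out.append(''.join(seg))
--         if brk is None:
--             return out
--         sep, cs = brk
--         out.append(sep)
--
--
-- def _handle_punkt(tokens: list) -> list:
--     return [x for t in tokens for x in _transform(t)]
-- ===== Notes on version B (the rewrite author's own statement) =====
-- stated objective: alternative
-- what changed: A's single keep/flush scan mutating a buffer is replaced by repeated splitting: a finder returns the maximal kept prefix and the first separator, and a driver loop emits segment then separator and restarts on the remainder with fresh (None) left context, which is correct because a separator is never alphanumeric so no prev-based keep rule can fire across it.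
import Mathlib
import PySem

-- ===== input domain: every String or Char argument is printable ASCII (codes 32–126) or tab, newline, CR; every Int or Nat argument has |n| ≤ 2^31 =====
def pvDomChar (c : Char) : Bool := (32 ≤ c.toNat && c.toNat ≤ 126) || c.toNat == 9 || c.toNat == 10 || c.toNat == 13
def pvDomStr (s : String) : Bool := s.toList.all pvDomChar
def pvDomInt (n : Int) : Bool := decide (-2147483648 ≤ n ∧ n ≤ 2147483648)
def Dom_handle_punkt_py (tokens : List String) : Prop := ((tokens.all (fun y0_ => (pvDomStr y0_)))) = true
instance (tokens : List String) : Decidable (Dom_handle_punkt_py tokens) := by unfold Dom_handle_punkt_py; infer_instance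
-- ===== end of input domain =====

-- B replaces A's single keep/flush scan by repeated splitting: a finder returns the
-- maximal kept prefix and the first separator, and a driver loop emits segment then
-- separator and restarts on the remainder with fresh left context (correct because a
-- separator is never alphanumeric, so no prev-based keep rule fires across it).
-- Python str.isnumeric is ported as PySem.Chars.isdigit — exact on the ASCII input domain.

-- ===== PORT A =====
-- inner `transform`: index loop over range(len(token)); p2/n2 are computed in the Python
-- and unused, kept here as dead lets for faithfulness; `if len(ch)` is always true for a
-- one-character string, so ch is appended unconditionally.
def pvTransformA (token : String) : List String :=
  let cs := token.toList
  if PySem.Chars.strIsalpha cs then [token] else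
  let token_len : Int := PySem.List.len cs
  let st :=
    (PySem.List.pyRange 0 token_len 1).foldl
      (fun (st : List String × List Char) (i : Int) =>
        let _p2 : Option Char := if 0 ≤ i - 2 then PySem.List.pyGet? cs (i - 2) else none
        let p1 : Option Char := if 0 ≤ i - 1 then PySem.List.pyGet? cs (i - 1) else none
        let ch : Char := PySem.List.pyGetD cs i ' '
        let n1 : Option Char := if i + 1 < token_len then PySem.List.pyGet? cs (i + 1) else none
        let _n2 : Option Char := if i + 2 < token_len then PySem.List.pyGet? cs (i + 2) else none
        if PySem.Chars.isalpha ch || PySem.Chars.isdigit ch || ch == ' ' || ch == '_' then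
          (st.1, st.2 ++ [ch])
        else if (ch == '.' || ch == ',') &&
                (match p1 with | some p => PySem.Chars.isdigit p | none => false) then
          (st.1, st.2 ++ [ch])
        else if ch == '\'' &&
                (match p1 with | some p => PySem.Chars.isalpha p | none => false) then
          (st.1, st.2 ++ [ch])
        else if ch == '&' &&
                (match p1 with | some p => PySem.Chars.isalpha p | none => false) &&
                (match n1 with | some q => PySem.Chars.isalpha q | none => false) then
          (st.1, st.2 ++ [ch])
        else
          ((if st.2.length ≠ 0 then st.1 ++ [String.ofList st.2] else st.1) ++ [String.ofList [ch]], []))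
      ([], [])
  if st.2.length ≠ 0 then st.1 ++ [String.ofList st.2] else st.1

def handle_punkt_py (tokens : List String) : List String :=
  tokens.foldl (fun normalized token => normalized ++ pvTransformA token) []

-- ===== PORT B =====
def pvKeepB (p : Option Char) (c : Char) (n : Option Char) : Bool :=
  PySem.Chars.isalpha c || PySem.Chars.isdigit c || c == ' ' || c == '_' ||
  ((c == '.' || c == ',') && p.any PySem.Chars.isdigit) ||
  (c == '\'' && p.any PySem.Chars.isalpha) ||
  (c == '&' && p.any PySem.Chars.isalpha && n.any PySem.Chars.isalpha)

-- Source B `_split`: scan for the first separator, tracking prev; next = head of the rest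
def pvSplitB (prev : Option Char) : List Char → List Char × Option (Char × List Char)
  | [] => ([], none)
  | c :: rest =>
    if !(pvKeepB prev c rest.head?) then ([], some (c, rest))
    else
      let r := pvSplitB (some c) rest
      (c :: r.1, r.2)

-- termination of Source B's driver loop: the rest after the first separator is shorter
theorem pvSplitB_rest_lt (cs : List Char) : ∀ (p : Option Char) (c : Char) (rest : List Char),
    (pvSplitB p cs).2 = some (c, rest) → rest.length < cs.length := by
  induction cs with
  | nil => intro p c rest h; simp [pvSplitB] at h
  | cons a tl ih =>
    intro p c rest h
    by_cases hk : pvKeepB p a tl.head?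
    · have h2 : (pvSplitB (some a) tl).2 = some (c, rest) := by
        simpa [pvSplitB, hk] using h
      have := ih (some a) c rest h2
      simp
      omega
    · simp [pvSplitB, hk] at h
      simp [← h.2]

-- Source B `_transform`'s while loop, with `out` the accumulator
def pvPiecesB (cs : List Char) (out : List String) : List String :=
  match hsp : pvSplitB none cs with
  | (seg, none) => if seg.isEmpty then out else out ++ [String.ofList seg]
  | (seg, some (sep, rest)) =>
      pvPiecesB rest ((if seg.isEmpty then out else out ++ [String.ofList seg]) ++ [String.ofList [sep]])
  termination_by cs.length
  decreasing_by exact pvSplitB_rest_lt cs none sep rest (by rw [hsp])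

def pvTransformB (token : String) : List String :=
  if PySem.Chars.strIsalpha token.toList then [token] else pvPiecesB token.toList []

def handle_punkt_py_alt (tokens : List String) : List String :=
  tokens.flatMap pvTransformB

-- ===== PRECONDITION & SPEC =====
def Spec_handle_punkt_py (tokens : List String) (out : List String) : Prop := out = handle_punkt_py_alt tokens
instance (tokens : List String) (out : List String) : Decidable (Spec_handle_punkt_py tokens out) := by unfold Spec_handle_punkt_py; infer_instance

-- ===== CLAIM (what is proved, stated in full; the proofs are below) =====
def Claim_equal_handle_punkt_py : Prop := ∀ (tokens : List String), Dom_handle_punkt_py tokens → Spec_handle_punkt_py tokens (handle_punkt_py tokens)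

-- ===== LEMMAS AND PROOFS =====

theorem pv_foldl_range_eq {α β : Type} (P : List β) (f : α → Int → α) (g : α → β → α)
    (h : ∀ (i : Nat) (hi : i < P.length) (st : α), f st (i : Int) = g st P[i])
    (st : α) :
    (PySem.List.pyRange 0 (P.length : Int) 1).foldl f st = P.foldl g st := by
  induction P using List.reverseRecOn generalizing st with
  | nil => simp [PySem.List.pyRange]
  | append_singleton Q x ih =>
    have hcast : ((Q ++ [x]).length : Int) = (Q.length : Int) + 1 := by simp [List.length_append]
    rw [hcast, PySem.List.pyRange_one_succ_right (by positivity), List.foldl_append,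
        List.foldl_append]
    have hQ := ih (fun i hi st => by
      have := h i (by simp; omega) st
      rwa [List.getElem_append_left hi] at this) st
    rw [hQ]
    have := h Q.length (by simp) (List.foldl g st Q)
    simpa using this

def pvCondIdx (cs : List Char) (i : Nat) : Bool :=
  pvKeepB (if 1 ≤ i then cs[i-1]? else none) (cs.getD i ' ') cs[i+1]?

def pvStep (st : List String × List Char) (p : Char × Bool) : List String × List Char :=
  if p.2 then (st.1, st.2 ++ [p.1])
  else ((if st.2.length ≠ 0 then st.1 ++ [String.ofList st.2] else st.1) ++ [String.ofList [p.1]], [])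

-- proof-only intermediate form: char-by-char grouping over a keep mask
def pvGroupB : List (Char × Bool) → List Char → List String
  | [], buf => if buf.isEmpty then [] else [String.ofList buf]
  | (c, true) :: rest, buf => pvGroupB rest (buf ++ [c])
  | (c, false) :: rest, buf =>
      (if buf.isEmpty then [] else [String.ofList buf]) ++ String.ofList [c] :: pvGroupB rest []

theorem pv_group_foldl (ps : List (Char × Bool)) :
    ∀ (m : List String) (b : List Char),
      ((List.foldl pvStep (m, b) ps).2.length ≠ 0 →
        (List.foldl pvStep (m, b) ps).1 ++ [String.ofList (List.foldl pvStep (m, b) ps).2]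
          = m ++ pvGroupB ps b) ∧
      ((List.foldl pvStep (m, b) ps).2.length = 0 →
        (List.foldl pvStep (m, b) ps).1 = m ++ pvGroupB ps b) := by
  induction ps with
  | nil =>
    intro m b
    have hb' := List.eq_nil_iff_length_eq_zero (l := b)
    constructor
    · intro hb
      simp [pvGroupB, List.isEmpty_iff_length_eq_zero] at *
      simp [hb]
    · intro hb
      simp [pvGroupB, List.isEmpty_iff_length_eq_zero, hb] at *
      simp [hb]
  | cons p rest ih =>
    intro m b
    obtain ⟨c, k⟩ := p
    cases k with
    | true =>
      have := ih m (b ++ [c])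
      simpa [pvStep, pvGroupB] using this
    | false =>
      have := ih ((if b.length ≠ 0 then m ++ [String.ofList b] else m) ++ [String.ofList [c]]) []
      constructor
      · intro hb
        rw [show List.foldl pvStep (m, b) ((c, false) :: rest)
              = List.foldl pvStep ((if b.length ≠ 0 then m ++ [String.ofList b] else m) ++ [String.ofList [c]], []) rest from rfl] at hb ⊢
        rw [this.1 hb]
        by_cases h : b.length = 0 <;>
          simp [pvGroupB, List.isEmpty_iff_length_eq_zero, h,
                List.eq_nil_iff_length_eq_zero]
      · intro hb
        rw [show List.foldl pvStep (m, b) ((c, false) :: rest)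
              = List.foldl pvStep ((if b.length ≠ 0 then m ++ [String.ofList b] else m) ++ [String.ofList [c]], []) rest from rfl] at hb ⊢
        rw [this.2 hb]
        by_cases h : b.length = 0 <;>
          simp [pvGroupB, List.isEmpty_iff_length_eq_zero, h,
                List.eq_nil_iff_length_eq_zero]

theorem pv_match_any {f : Char → Bool} (o : Option Char) :
    (match o with | some p => f p | none => false) = o.any f := by
  cases o <;> rfl

theorem pv_chain {α : Type} (a1 a2 a3 a4 : Bool) (X Y : α) :
    (if a1 then X else if a2 then X else if a3 then X else if a4 then X else Y)
    = (if a1 || a2 || a3 || a4 then X else Y) := by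
  cases a1 <;> cases a2 <;> cases a3 <;> cases a4 <;> simp

-- A's loop body, named for the proofs (definitionally the lambda inside pvTransformA)
def pvStepA (cs : List Char) (st : List String × List Char) (i : Int) : List String × List Char :=
  let _p2 : Option Char := if 0 ≤ i - 2 then PySem.List.pyGet? cs (i - 2) else none
  let p1 : Option Char := if 0 ≤ i - 1 then PySem.List.pyGet? cs (i - 1) else none
  let ch : Char := PySem.List.pyGetD cs i ' '
  let n1 : Option Char := if i + 1 < (PySem.List.len cs) then PySem.List.pyGet? cs (i + 1) else none
  let _n2 : Option Char := if i + 2 < (PySem.List.len cs) then PySem.List.pyGet? cs (i + 2) else none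
  if PySem.Chars.isalpha ch || PySem.Chars.isdigit ch || ch == ' ' || ch == '_' then
    (st.1, st.2 ++ [ch])
  else if (ch == '.' || ch == ',') &&
          (match p1 with | some p => PySem.Chars.isdigit p | none => false) then
    (st.1, st.2 ++ [ch])
  else if ch == '\'' &&
          (match p1 with | some p => PySem.Chars.isalpha p | none => false) then
    (st.1, st.2 ++ [ch])
  else if ch == '&' &&
          (match p1 with | some p => PySem.Chars.isalpha p | none => false) &&
          (match n1 with | some q => PySem.Chars.isalpha q | none => false) then
    (st.1, st.2 ++ [ch])
  else
    ((if st.2.length ≠ 0 then st.1 ++ [String.ofList st.2] else st.1) ++ [String.ofList [ch]], [])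

theorem pvTransformA_eq (token : String) :
    pvTransformA token =
      (if PySem.Chars.strIsalpha token.toList then [token] else
        let st := (PySem.List.pyRange 0 (PySem.List.len token.toList) 1).foldl
          (pvStepA token.toList) ([], [])
        if st.2.length ≠ 0 then st.1 ++ [String.ofList st.2] else st.1) := rfl

theorem pv_stepA_eq (cs : List Char) (i : Nat) (hi : i < cs.length)
    (hi2 : i < (cs.zip ((List.range cs.length).map (pvCondIdx cs))).length)
    (st : List String × List Char) :
    pvStepA cs st (i : Int)
      = pvStep st (cs.zip ((List.range cs.length).map (pvCondIdx cs)))[i] := by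
  have hgd : cs.getD i ' ' = cs[i] := by
    simp [List.getD_eq_getElem?_getD, List.getElem?_eq_getElem hi]
  have hch : PySem.List.pyGetD cs (i : Int) ' ' = cs[i] := by
    simp [PySem.List.pyGetD_natCast, List.getElem?_eq_getElem hi]
  have hp1 : (if (0:Int) ≤ (i:Int) - 1 then PySem.List.pyGet? cs ((i:Int) - 1) else none)
      = (if 1 ≤ i then cs[i-1]? else none) := by
    by_cases h1 : 1 ≤ i
    · rw [if_pos (by omega), if_pos h1, show (i:Int) - 1 = ((i-1 : Nat) : Int) by omega,
          PySem.List.pyGet?_natCast]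
    · rw [if_neg (by omega), if_neg h1]
  have hn1 : (if (i:Int) + 1 < PySem.List.len cs then PySem.List.pyGet? cs ((i:Int) + 1) else none)
      = cs[i+1]? := by
    rw [PySem.List.len_eq]
    by_cases h1 : i + 1 < cs.length
    · rw [if_pos (by exact_mod_cast h1), show (i:Int) + 1 = ((i+1 : Nat) : Int) by omega,
          PySem.List.pyGet?_natCast]
    · rw [if_neg (by push_cast; omega), eq_comm, List.getElem?_eq_none_iff]
      omega
  unfold pvStepA
  simp only [List.getElem_zip, List.getElem_map, List.getElem_range,
             pv_match_any, hch, hp1, hn1]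
  unfold pvCondIdx pvKeepB pvStep
  rw [pv_chain]
  simp only [hgd, Bool.or_assoc]

-- the keep mask as a recursive list, prev carried along (mirrors pvSplitB's scan)
def pvPairs (p0 : Option Char) : List Char → List (Char × Bool)
  | [] => []
  | c :: rest => (c, pvKeepB p0 c rest.head?) :: pvPairs (some c) rest

theorem pvPairs_length (cs : List Char) : ∀ p0, (pvPairs p0 cs).length = cs.length := by
  induction cs with
  | nil => intro p0; rfl
  | cons c rest ih => intro p0; simp [pvPairs, ih]

theorem pvPairs_getElem (cs : List Char) : ∀ (p0 : Option Char) (i : Nat)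
    (h : i < cs.length) (h2 : i < (pvPairs p0 cs).length),
    (pvPairs p0 cs)[i] = (cs[i], pvKeepB (if i = 0 then p0 else cs[i-1]?) cs[i] cs[i+1]?) := by
  induction cs with
  | nil => intro p0 i h h2; simp at h
  | cons c rest ih =>
    intro p0 i h h2
    cases i with
    | zero =>
      simp [pvPairs, List.head?_eq_getElem?]
    | succ j =>
      have hj : j < rest.length := by simp at h; omega
      have hj2 : j < (pvPairs (some c) rest).length := by rw [pvPairs_length]; exact hj
      have := ih (some c) j hj hj2
      simp only [pvPairs, List.getElem_cons_succ, this]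
      congr 1
      cases j with
      | zero => simp
      | succ k =>
        simp only [Nat.succ_sub_one]
        rw [if_neg (by omega)]
        have hk : k < rest.length := by omega
        simp [List.getElem?_cons_succ]

theorem pv_pairs_eq_zip (cs : List Char) :
    pvPairs none cs = cs.zip ((List.range cs.length).map (pvCondIdx cs)) := by
  apply List.ext_getElem
  · simp [pvPairs_length]
  · intro i h1 h2
    rw [pvPairs_getElem cs none i (by rw [pvPairs_length] at h1; exact h1) h1]
    have hi : i < cs.length := by rw [pvPairs_length] at h1; exact h1
    have hgd : cs.getD i ' ' = cs[i] := by
      simp [List.getD_eq_getElem?_getD, List.getElem?_eq_getElem hi]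
    have hprev : (if i = 0 then (none : Option Char) else cs[i-1]?) = (if 1 ≤ i then cs[i-1]? else none) := by
      cases i with
      | zero => simp
      | succ j => simp
    simp only [List.getElem_zip, List.getElem_map, List.getElem_range]
    unfold pvCondIdx
    rw [hgd, hprev]

-- a separator is never alphanumeric
theorem pv_sep_not_alnum {p : Option Char} {c : Char} {n : Option Char}
    (h : pvKeepB p c n = false) :
    PySem.Chars.isalpha c = false ∧ PySem.Chars.isdigit c = false := by
  unfold pvKeepB at h
  constructor <;> (by_cases ha : PySem.Chars.isalpha c <;> by_cases hd : PySem.Chars.isdigit c <;> simp_all)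

-- left context of a separator behaves like no context at all
theorem pv_keep_congr {s : Char} (h1 : PySem.Chars.isalpha s = false)
    (h2 : PySem.Chars.isdigit s = false) (c : Char) (n : Option Char) :
    pvKeepB (some s) c n = pvKeepB none c n := by
  simp [pvKeepB, h1, h2]

theorem pvPairs_none_of {s : Char} (h1 : PySem.Chars.isalpha s = false)
    (h2 : PySem.Chars.isdigit s = false) (cs : List Char) :
    pvPairs (some s) cs = pvPairs none cs := by
  cases cs with
  | nil => rfl
  | cons c rest => simp [pvPairs, pv_keep_congr h1 h2]

-- mask grouping = split at the first separator, then group the remainder afresh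
theorem pv_group_split (cs : List Char) : ∀ (p0 : Option Char) (buf : List Char),
    pvGroupB (pvPairs p0 cs) buf =
      (match (pvSplitB p0 cs).2 with
       | none => if (buf ++ (pvSplitB p0 cs).1).isEmpty then []
                 else [String.ofList (buf ++ (pvSplitB p0 cs).1)]
       | some (c, rest) =>
           (if (buf ++ (pvSplitB p0 cs).1).isEmpty then []
            else [String.ofList (buf ++ (pvSplitB p0 cs).1)]) ++
             String.ofList [c] :: pvGroupB (pvPairs none rest) []) := by
  induction cs with
  | nil => intro p0 buf; simp [pvPairs, pvSplitB, pvGroupB]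
  | cons c rest ih =>
    intro p0 buf
    by_cases hk : pvKeepB p0 c rest.head?
    · rw [show pvPairs p0 (c :: rest) = (c, true) :: pvPairs (some c) rest by simp [pvPairs, hk]]
      rw [show pvSplitB p0 (c :: rest)
            = (c :: (pvSplitB (some c) rest).1, (pvSplitB (some c) rest).2) by simp [pvSplitB, hk]]
      rw [show pvGroupB ((c, true) :: pvPairs (some c) rest) buf
            = pvGroupB (pvPairs (some c) rest) (buf ++ [c]) from rfl]
      rw [ih (some c) (buf ++ [c])]
      cases hs : (pvSplitB (some c) rest).2 with
      | none => simp
      | some pr => obtain ⟨d, tl⟩ := pr; simp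
    · have hk' : pvKeepB p0 c rest.head? = false := Bool.eq_false_iff.mpr hk
      obtain ⟨h1, h2⟩ := pv_sep_not_alnum hk'
      rw [show pvPairs p0 (c :: rest) = (c, false) :: pvPairs (some c) rest by simp [pvPairs, hk']]
      rw [show pvSplitB p0 (c :: rest) = ([], some (c, rest)) by simp [pvSplitB, hk']]
      rw [show pvGroupB ((c, false) :: pvPairs (some c) rest) buf
            = (if buf.isEmpty then [] else [String.ofList buf])
              ++ String.ofList [c] :: pvGroupB (pvPairs (some c) rest) [] from rfl]
      rw [pvPairs_none_of h1 h2]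
      simp

-- accumulator lemma for Source B's driver loop
theorem pvPiecesB_acc (n : Nat) : ∀ (cs : List Char), cs.length ≤ n →
    ∀ (out : List String), pvPiecesB cs out = out ++ pvPiecesB cs [] := by
  induction n with
  | zero =>
    intro cs hcs out
    have hnil : cs = [] := by cases cs <;> simp_all
    subst hnil
    unfold pvPiecesB
    simp [pvSplitB]
  | succ m ih =>
    intro cs hcs out
    unfold pvPiecesB
    cases hs : pvSplitB none cs with
    | mk seg r =>
      cases r with
      | none => simp only [List.nil_append]; split <;> simp
      | some pr =>
        obtain ⟨sep, tl⟩ := pr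
        have hlt := pvSplitB_rest_lt cs none sep tl (by rw [hs])
        simp only [List.nil_append]
        rw [ih tl (by omega) ((if seg.isEmpty then out else out ++ [String.ofList seg]) ++ [String.ofList [sep]]),
            ih tl (by omega) ((if seg.isEmpty then [] else [String.ofList seg]) ++ [String.ofList [sep]])]
        split <;> simp

theorem pv_group_eq_pieces (n : Nat) : ∀ (cs : List Char), cs.length ≤ n →
    pvGroupB (pvPairs none cs) [] = pvPiecesB cs [] := by
  induction n with
  | zero =>
    intro cs hcs
    have hnil : cs = [] := by cases cs <;> simp_all
    subst hnil
    unfold pvPiecesB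
    simp [pvPairs, pvGroupB, pvSplitB]
  | succ m ih =>
    intro cs hcs
    rw [pv_group_split cs none []]
    unfold pvPiecesB
    cases hs : pvSplitB none cs with
    | mk seg r =>
      cases r with
      | none => simp
      | some pr =>
        obtain ⟨sep, tl⟩ := pr
        have hlt := pvSplitB_rest_lt cs none sep tl (by rw [hs])
        simp only [List.nil_append]
        rw [ih tl (by omega),
            pvPiecesB_acc tl.length tl le_rfl ((if seg.isEmpty then [] else [String.ofList seg]) ++ [String.ofList [sep]])]
        split <;> simp

theorem pv_transform_eq (token : String) : pvTransformA token = pvTransformB token := by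
  rw [pvTransformA_eq]
  unfold pvTransformB
  by_cases halpha : PySem.Chars.strIsalpha token.toList
  · simp [halpha]
  · simp only [halpha, Bool.false_eq_true, if_false]
    set cs := token.toList with hcs
    have hP : (cs.zip ((List.range cs.length).map (pvCondIdx cs))).length = cs.length := by simp
    have hf := pv_foldl_range_eq (cs.zip ((List.range cs.length).map (pvCondIdx cs)))
      (pvStepA cs) pvStep
      (fun i hi st => pv_stepA_eq cs i (by simp at hi; omega) hi st) ([], [])
    rw [hP] at hf
    rw [PySem.List.len_eq, hf]
    have hg := pv_group_foldl (cs.zip ((List.range cs.length).map (pvCondIdx cs))) [] []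
    have hend : pvGroupB (cs.zip ((List.range cs.length).map (pvCondIdx cs))) [] = pvPiecesB cs [] := by
      rw [← pv_pairs_eq_zip, pv_group_eq_pieces cs.length cs le_rfl]
    by_cases hz : (List.foldl pvStep ([], []) (cs.zip ((List.range cs.length).map (pvCondIdx cs)))).2.length = 0
    · rw [if_neg (by omega), ← hend]
      simpa using hg.2 hz
    · rw [if_pos hz, ← hend]
      simpa using hg.1 hz

-- ===== VERDICT (by name: the statement is the Claim_ definition above) =====
theorem handle_punkt_py_spec : Claim_equal_handle_punkt_py := by
  intro tokens _
  unfold Spec_handle_punkt_py handle_punkt_py handle_punkt_py_alt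
  rw [PySem.List.foldl_append_eq_flatMap]
  simp [funext pv_transform_eq]
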